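-- pv_equiv track=rewrite | github.com/yoonbang98/Backjoon | 프로그래머스/1/92334. 신고 결과 받기/신고 결과 받기.py | solution
-- ===== SOURCE A (Python) =====
-- from collections import defaultdict
--
-- def solution(id_list, report, k):
--     num_report = defaultdict(int)
--     report_id = defaultdict(set)
--     for re in report:
--         src, dst = re.split()
--         if dst not in report_id[src]:
--             num_report[dst] += 1
--         report_id[src].add(dst)
--
--     answer = []
--     for id in id_list:
--         report_set = report_id[id]
--         tmp = 0
--         for dst in report_set:
--             if num_report[dst] >= k:
--                 tmp += 1
--         answer.append(tmp)
--     return answer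
-- ===== SOURCE B (Python) =====
-- def solution(id_list, report, k):
--     pairs = []
--     for r in report:
--         src, dst = r.split()
--         if (src, dst) not in pairs:
--             pairs.append((src, dst))
--     dsts = [d for _, d in pairs]
--     return [sum(1 for (s, d) in pairs if s == i and dsts.count(d) >= k)
--             for i in id_list]
-- ===== Notes on version B (the rewrite author's own statement) =====
-- stated objective: alternative
-- what changed: B builds no hash tables at all: it keeps one deduplicated list of (src,dst) pairs and answers each id by scanning that list, recomputing each target's distinct-reporter count with list.count, instead of A's incrementally maintained per-target counter dict and per-reporter target-set dict.
import Mathlib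
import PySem

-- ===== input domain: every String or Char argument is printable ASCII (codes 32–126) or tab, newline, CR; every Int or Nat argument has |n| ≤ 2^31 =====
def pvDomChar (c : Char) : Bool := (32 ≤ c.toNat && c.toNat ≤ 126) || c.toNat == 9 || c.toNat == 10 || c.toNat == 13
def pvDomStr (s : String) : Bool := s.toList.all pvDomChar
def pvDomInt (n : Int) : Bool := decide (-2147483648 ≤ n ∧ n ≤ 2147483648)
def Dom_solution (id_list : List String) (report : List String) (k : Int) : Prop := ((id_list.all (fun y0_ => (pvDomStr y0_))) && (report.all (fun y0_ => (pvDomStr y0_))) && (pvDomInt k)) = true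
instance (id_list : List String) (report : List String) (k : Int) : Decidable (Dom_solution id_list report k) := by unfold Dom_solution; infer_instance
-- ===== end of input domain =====

-- B keeps no counter/target dicts at all: one deduplicated pair list, with each target's
-- distinct-reporter count recomputed by list.count during a per-id scan (objective: alternative).
-- Both Pythons raise ValueError when a report does not split into exactly two words; Pre_ excludes those inputs.

-- ===== PORT A =====
def solution (id_list : List String) (report : List String) (k : Int) : List Int :=
  -- state: (num_report, report_id); the `_ => st` arm is Python's ValueError, excluded by Pre_
  let st := report.foldl
    (fun (st : PySem.Dict String Int × PySem.Dict String (PySem.Set String)) re =>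
      match PySem.Str.split₀ re with
      | [src, dst] =>
        let s := st.2.getD src []
        let num := if s.contains dst then st.1 else st.1.modify dst 0 (· + 1)
        (num, st.2.insert src (PySem.Set.add s dst))
      | _ => st)
    (PySem.Dict.empty, PySem.Dict.empty)
  id_list.map (fun id =>
    let report_set := st.2.getD id []
    report_set.foldl (fun tmp dst => if st.1.getD dst 0 ≥ k then tmp + 1 else tmp) 0)

-- ===== PORT B =====
def solution_alt (id_list : List String) (report : List String) (k : Int) : List Int :=
  -- pairs: deduped (src, dst) list; the `_ => acc` arm is Python's ValueError, excluded by Pre_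
  let pairs := report.foldl
    (fun (acc : List (String × String)) r =>
      let ps := PySem.Str.split₀ r
      if ps.length = 2 then
        let src := ps.getD 0 ""
        let dst := ps.getD 1 ""
        if acc.contains (src, dst) then acc else acc ++ [(src, dst)]
      else acc) []
  let dsts := pairs.map Prod.snd
  id_list.map (fun i =>
    (pairs.countP (fun p => p.1 == i && decide ((dsts.count p.2 : Int) ≥ k)) : Int))

-- ===== PRECONDITION & SPEC =====
-- Pre_ excludes exactly the inputs where some report string does not consist of two
-- whitespace-separated words: there `src, dst = re.split()` raises ValueError in A (and in B).
def Pre_solution (id_list : List String) (report : List String) (k : Int) : Prop :=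
  ∀ r ∈ report, (PySem.Str.split₀ r).length = 2
instance (id_list : List String) (report : List String) (k : Int) : Decidable (Pre_solution id_list report k) := by unfold Pre_solution; infer_instance
def pvWitness_solution : List String × List String × Int :=
  (["muzi", "frodo", "apeach", "neo"], ["muzi frodo", "apeach frodo", "frodo neo", "muzi neo", "apeach muzi"], 2)

def Spec_solution (id_list : List String) (report : List String) (k : Int) (out : List Int) : Prop := out = solution_alt id_list report k
instance (id_list : List String) (report : List String) (k : Int) (out : List Int) : Decidable (Spec_solution id_list report k out) := by unfold Spec_solution; infer_instance

-- ===== CLAIM (what is proved, stated in full; the proofs are below) =====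
def Claim_equal_solution : Prop := ∀ (id_list : List String) (report : List String) (k : Int), Dom_solution id_list report k → Pre_solution id_list report k → Spec_solution id_list report k (solution id_list report k)

-- ===== LEMMAS AND PROOFS =====

-- Invariant: A's two dicts are determined by B's deduplicated pair list P.
def pvInv (stA : PySem.Dict String Int × PySem.Dict String (PySem.Set String))
    (P : List (String × String)) : Prop :=
  (∀ d, stA.1.getD d 0 = ((P.map Prod.snd).count d : Int)) ∧
  (∀ s, stA.2.getD s [] = (P.filter (fun p => p.1 == s)).map Prod.snd)

lemma pvInv_empty : pvInv (PySem.Dict.empty, PySem.Dict.empty) [] := by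
  constructor <;> intro x <;> simp

lemma pvInv_step (stA : PySem.Dict String Int × PySem.Dict String (PySem.Set String))
    (P : List (String × String)) (src dst : String) (h : pvInv stA P) :
    pvInv
      (let s := stA.2.getD src []
       ((if s.contains dst then stA.1 else stA.1.modify dst 0 (· + 1)),
        stA.2.insert src (PySem.Set.add s dst)))
      (if P.contains (src, dst) then P else P ++ [(src, dst)]) := by
  obtain ⟨h1, h2⟩ := h
  dsimp only
  have hmem : (src, dst) ∈ P ↔ dst ∈ stA.2.getD src [] := by
    rw [h2 src]
    constructor
    · intro hp
      exact List.mem_map.mpr ⟨(src, dst), List.mem_filter.mpr ⟨hp, by simp⟩, rfl⟩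
    · intro hd
      obtain ⟨p, hpf, hp2⟩ := List.mem_map.mp hd
      obtain ⟨hpmem, hps⟩ := List.mem_filter.mp hpf
      have hpe : p = (src, dst) := by
        rcases p with ⟨a, b⟩
        simp only [beq_iff_eq] at hps
        simp only at hp2
        simp [hps, hp2]
      rwa [hpe] at hpmem
  by_cases hin : (src, dst) ∈ P
  · have hcP : P.contains (src, dst) = true := List.elem_eq_true_of_mem hin
    have hdmem : dst ∈ stA.2.getD src [] := hmem.mp hin
    have hcA : (stA.2.getD src []).contains dst = true :=
      (PySem.Set.contains_iff _ _).mpr hdmem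
    have haddA : PySem.Set.add (stA.2.getD src []) dst = stA.2.getD src [] := by
      simp [PySem.Set.add, hdmem]
    rw [hcA, hcP, if_pos rfl, if_pos rfl, haddA]
    refine ⟨h1, fun s => ?_⟩
    by_cases hs : s = src
    · subst hs; rw [PySem.Dict.getD_insert, if_pos rfl]; exact h2 _
    · rw [PySem.Dict.getD_insert, if_neg hs]; exact h2 _
  · have hnA : dst ∉ stA.2.getD src [] := fun hh => hin (hmem.mpr hh)
    have hcP : P.contains (src, dst) = false := by
      simpa using fun hh => hin (by simpa using hh)
    have hcA : (stA.2.getD src []).contains dst = false :=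
      Bool.eq_false_iff.mpr (fun hh => hnA ((PySem.Set.contains_iff _ _).mp hh))
    have haddA : PySem.Set.add (stA.2.getD src []) dst = stA.2.getD src [] ++ [dst] := by
      simp [PySem.Set.add, hnA]
    rw [hcA, hcP]
    simp only [Bool.false_eq_true, if_false, haddA]
    constructor
    · intro d
      rw [PySem.Dict.getD_modify]
      by_cases hd : d = dst
      · subst hd
        rw [if_pos rfl, h1 d]
        simp [List.count_append]
      · rw [if_neg hd, h1 d]
        simp [List.count_append, Ne.symm hd]
    · intro s
      rw [PySem.Dict.getD_insert, List.filter_append, List.map_append]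
      by_cases hs : s = src
      · rw [if_pos hs, hs, h2 src]
        simp
      · rw [if_neg hs, h2 s]
        have hbe : (src == s) = false := by simp [Ne.symm hs]
        simp [hbe]

lemma pvInv_fold (report : List String)
    (stA : PySem.Dict String Int × PySem.Dict String (PySem.Set String))
    (P : List (String × String))
    (hpre : ∀ r ∈ report, (PySem.Str.split₀ r).length = 2)
    (h : pvInv stA P) :
    pvInv
      (report.foldl
        (fun st re =>
          match PySem.Str.split₀ re with
          | [src, dst] =>
            let s := st.2.getD src []
            let num := if s.contains dst then st.1 else st.1.modify dst 0 (· + 1)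
            (num, st.2.insert src (PySem.Set.add s dst))
          | _ => st) stA)
      (report.foldl
        (fun acc r =>
          let ps := PySem.Str.split₀ r
          if ps.length = 2 then
            let src := ps.getD 0 ""
            let dst := ps.getD 1 ""
            if acc.contains (src, dst) then acc else acc ++ [(src, dst)]
          else acc) P) := by
  induction report generalizing stA P with
  | nil => exact h
  | cons r rs ih =>
    simp only [List.foldl_cons]
    have hr : (PySem.Str.split₀ r).length = 2 := hpre r (by simp)
    obtain ⟨src, dst, hsd⟩ : ∃ src dst, PySem.Str.split₀ r = [src, dst] := by
      match hs : PySem.Str.split₀ r with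
      | [a, b] => exact ⟨a, b, rfl⟩
      | [] => rw [hs] at hr; simp at hr
      | [a] => rw [hs] at hr; simp at hr
      | a :: b :: c :: t => rw [hs] at hr; simp at hr
    rw [hsd]
    exact ih _ _ (fun x hx => hpre x (by simp [hx])) (pvInv_step stA P src dst h)

-- ===== VERDICT (by name: the statement is the Claim_ definition above) =====
theorem solution_spec : Claim_equal_solution := by
  intro id_list report k _ hpre
  unfold Spec_solution solution solution_alt
  have hinv := pvInv_fold report _ _ hpre pvInv_empty
  unfold pvInv at hinv
  dsimp only at hinv ⊢
  obtain ⟨h1, h2⟩ := hinv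
  refine List.map_congr_left (fun id _ => ?_)
  rw [PySem.List.foldl_ite_add_one, h2 id, zero_add]
  rw [List.countP_map, List.countP_filter]
  refine congrArg Int.ofNat (List.countP_congr (fun p _ => ?_))
  simp only [Function.comp_apply]
  rw [h1 p.2, Bool.and_comm]
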